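-- pv_equiv track=rewrite | github.com/pypi-data/pypi-mirror-138 | packages/hiutils/hiutils-0.2.1.tar.gz/hiutils-0.2.1/hiutils/annotations.py | merge_concepts
-- ===== SOURCE A (Python) =====
-- def merge_concepts(anns_counts, groups, keep_other_concepts=False, keep_empty = True):
-- 	"""
-- 	anns_counts: dict - output of aggregated annotations
-- 	groups: dict - {group_name: [contained CUI]}. Must be 1:1 CUI:Group.
-- 	keep_other_concepts: bool - if False concepts that are not in a group are not returned in the output
-- 	keep_empty: bool - if false keys in anns_counts with no entries after aggregation will not be returned
-- 	"""
--
-- 	aggregated = {}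
-- 	other_concepts = set()
-- 	for cuis in groups.values():
-- 		other_concepts.update(cuis)
--
-- 	for pt, counts in anns_counts.items():
-- 		agg = {}
-- 		for name, cuis in groups.items():
-- 			total = sum([counts[x] for x in cuis if x in counts])
-- 			if total != 0:
-- 				agg[name] = total
-- 		if keep_other_concepts:
-- 			others = {x:counts[x] for x in counts if x in other_concepts}
-- 			agg.update(others)
-- 		if len(agg) == 0 and keep_empty == False:
-- 			continue
-- 		aggregated[pt] = agg
--
-- 	return aggregated
-- ===== SOURCE B (Python) =====
-- def merge_concepts(anns_counts, groups, keep_other_concepts=False, keep_empty=True):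
--     # Invert the groups once: CUI -> list of group names (with multiplicity),
--     # then aggregate each patient's counts in a single pass over its items.
--     cui2groups = {}
--     for name, cuis in groups.items():
--         for x in cuis:
--             cui2groups.setdefault(x, []).append(name)
--     group_names = list(groups)
--
--     aggregated = {}
--     for pt, counts in anns_counts.items():
--         totals = {}
--         for x, c in counts.items():
--             for g in cui2groups.get(x, ()):
--                 totals[g] = totals.get(g, 0) + c
--         agg = {name: totals[name] for name in group_names if totals.get(name, 0) != 0}
--         if keep_other_concepts:
--             for x, c in counts.items():
--                 if x in cui2groups:
--                     agg[x] = c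
--         if agg or keep_empty:
--             aggregated[pt] = agg
--     return aggregated
-- ===== Notes on version B (the rewrite author's own statement) =====
-- stated objective: faster
-- what changed: Instead of rescanning every group's whole CUI list for every patient, B inverts the groups once into a CUI->group-names index and accumulates each patient's group totals in a single pass over that patient's own counts.
import Mathlib
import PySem

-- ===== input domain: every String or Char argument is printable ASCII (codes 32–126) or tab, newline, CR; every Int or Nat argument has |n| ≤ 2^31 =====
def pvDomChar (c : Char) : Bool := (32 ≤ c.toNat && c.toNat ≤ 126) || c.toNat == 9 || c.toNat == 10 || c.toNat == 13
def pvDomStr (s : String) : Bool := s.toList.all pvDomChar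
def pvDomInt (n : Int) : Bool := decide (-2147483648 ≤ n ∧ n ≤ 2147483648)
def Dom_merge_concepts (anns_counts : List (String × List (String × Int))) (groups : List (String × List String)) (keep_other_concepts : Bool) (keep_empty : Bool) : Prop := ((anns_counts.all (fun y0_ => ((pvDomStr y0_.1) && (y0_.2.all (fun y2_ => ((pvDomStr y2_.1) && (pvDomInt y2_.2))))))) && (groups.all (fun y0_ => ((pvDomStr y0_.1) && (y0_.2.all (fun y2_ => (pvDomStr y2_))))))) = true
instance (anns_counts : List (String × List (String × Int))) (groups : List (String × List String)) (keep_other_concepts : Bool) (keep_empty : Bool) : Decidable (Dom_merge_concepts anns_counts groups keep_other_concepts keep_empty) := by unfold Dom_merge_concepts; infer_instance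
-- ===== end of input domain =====

-- B replaces A's per-patient scan over every group's whole CUI list by a precomputed
-- CUI→group-names inverted index, accumulating group totals in one pass over each
-- patient's own counts (objective: faster). Both Pythons return a fresh dict (no
-- argument is mutated).

-- ===== PORT A =====
-- other_concepts = union of all group CUI lists (a Python set, used only for membership)
def mcOther (groupsD : PySem.Dict String (List String)) : PySem.Set String :=
  groupsD.values.foldl (fun s cuis => PySem.Set.update s cuis) PySem.Set.empty

-- agg = {name: sum([counts[x] for x in cuis if x in counts]) for ...} keeping only nonzero totals
def mcAggA (groupsD : PySem.Dict String (List String)) (counts : PySem.Dict String Int) :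
    PySem.Dict String Int :=
  groupsD.items.foldl (fun agg nc =>
    let total := ((nc.2.filter (fun x => counts.contains x)).map (fun x => counts.getD x 0)).sum
    if total ≠ 0 then agg.insert nc.1 total else agg) PySem.Dict.empty

def merge_concepts (anns_counts : List (String × List (String × Int))) (groups : List (String × List String)) (keep_other_concepts : Bool) (keep_empty : Bool) : List (String × List (String × Int)) :=
  let groupsD : PySem.Dict String (List String) := PySem.Dict.ofList groups
  let other_concepts := mcOther groupsD
  let aggregated : PySem.Dict String (List (String × Int)) :=
    (PySem.Dict.ofList anns_counts).items.foldl (fun aggregated pc =>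
      let counts : PySem.Dict String Int := PySem.Dict.ofList pc.2
      let agg := mcAggA groupsD counts
      let agg := if keep_other_concepts then
          counts.items.foldl (fun a p =>
            if PySem.Set.contains other_concepts p.1 then a.insert p.1 p.2 else a) agg
        else agg
      if agg.size = 0 ∧ keep_empty = false then aggregated
      else aggregated.insert pc.1 agg.items) PySem.Dict.empty
  aggregated.items

-- ===== PORT B =====
-- cui2groups: CUI -> list of group names containing it (with multiplicity), built once
def mcCui2Groups (groupsD : PySem.Dict String (List String)) : PySem.Dict String (List String) :=
  groupsD.items.foldl (fun d nc =>
    nc.2.foldl (fun d x => d.modify x [] (fun l => l ++ [nc.1])) d) PySem.Dict.empty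

-- totals[g] accumulated in one pass over the patient's own count items
def mcTotalsB (c2g : PySem.Dict String (List String)) (counts : PySem.Dict String Int) :
    PySem.Dict String Int :=
  counts.items.foldl (fun t p =>
    (c2g.getD p.1 []).foldl (fun t g => t.modify g 0 (fun v => v + p.2)) t) PySem.Dict.empty

-- agg = {name: totals[name] for name in group_names if totals.get(name, 0) != 0}
def mcAggB (group_names : List String) (totals : PySem.Dict String Int) : PySem.Dict String Int :=
  group_names.foldl (fun a name =>
    if totals.getD name 0 ≠ 0 then a.insert name (totals.getD name 0) else a) PySem.Dict.empty

def merge_concepts_alt (anns_counts : List (String × List (String × Int))) (groups : List (String × List String)) (keep_other_concepts : Bool) (keep_empty : Bool) : List (String × List (String × Int)) :=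
  let groupsD : PySem.Dict String (List String) := PySem.Dict.ofList groups
  let cui2groups := mcCui2Groups groupsD
  let group_names := groupsD.keys
  let aggregated : PySem.Dict String (List (String × Int)) :=
    (PySem.Dict.ofList anns_counts).items.foldl (fun aggregated pc =>
      let counts : PySem.Dict String Int := PySem.Dict.ofList pc.2
      let totals := mcTotalsB cui2groups counts
      let agg := mcAggB group_names totals
      let agg := if keep_other_concepts then
          counts.items.foldl (fun a p =>
            if cui2groups.contains p.1 then a.insert p.1 p.2 else a) agg
        else agg
      if agg.size ≠ 0 ∨ keep_empty then aggregated.insert pc.1 agg.items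
      else aggregated) PySem.Dict.empty
  aggregated.items

-- ===== PRECONDITION & SPEC =====
def Spec_merge_concepts (anns_counts : List (String × List (String × Int))) (groups : List (String × List String)) (keep_other_concepts : Bool) (keep_empty : Bool) (out : List (String × List (String × Int))) : Prop := out = merge_concepts_alt anns_counts groups keep_other_concepts keep_empty
instance (anns_counts : List (String × List (String × Int))) (groups : List (String × List String)) (keep_other_concepts : Bool) (keep_empty : Bool) (out : List (String × List (String × Int))) : Decidable (Spec_merge_concepts anns_counts groups keep_other_concepts keep_empty out) := by unfold Spec_merge_concepts; infer_instance

-- ===== CLAIM (what is proved, stated in full; the proofs are below) =====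
def Claim_equal_merge_concepts : Prop := ∀ (anns_counts : List (String × List (String × Int))) (groups : List (String × List String)) (keep_other_concepts : Bool) (keep_empty : Bool), Dom_merge_concepts anns_counts groups keep_other_concepts keep_empty → Spec_merge_concepts anns_counts groups keep_other_concepts keep_empty (merge_concepts anns_counts groups keep_other_concepts keep_empty)

-- ===== LEMMAS AND PROOFS =====

-- a sum of entry-picks over an association list with no matching key is 0
theorem pv_sum_pick_zero (l : List (String × Int)) (x : String)
    (h : ∀ p ∈ l, p.1 ≠ x) : (l.map (fun p => if p.1 = x then p.2 else 0)).sum = 0 := by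
  induction l with
  | nil => simp
  | cons p l ih =>
    simp only [List.map_cons, List.sum_cons]
    rw [if_neg (h p (by simp)), ih (fun q hq => h q (by simp [hq]))]
    simp

-- dict lookup as a sum over the items of a Nodup-keyed dict
theorem pv_getD_eq_sum (d : PySem.Dict String Int) (hnd : d.keys.Nodup) (x : String) :
    d.getD x 0 = (d.items.map (fun p => if p.1 = x then p.2 else 0)).sum := by
  obtain ⟨l⟩ := d
  induction l with
  | nil => simp [PySem.Dict.getD_eq_get?_getD]; rfl
  | cons p l ih =>
    obtain ⟨k, v⟩ := p
    simp only [PySem.Dict.keys_mk, List.map_cons, List.nodup_cons] at hnd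
    simp only [PySem.Dict.getD_eq_get?_getD, PySem.Dict.get?_mk_cons]
    by_cases hk : k = x
    · subst hk
      simp only [beq_self_eq_true]
      have hrest : ∀ q ∈ l, q.1 ≠ k := by
        intro q hq he; exact hnd.1 (he ▸ List.mem_map_of_mem hq)
      simp [pv_sum_pick_zero l k hrest]
    · have hb : (k == x) = false := by simp [hk]
      simp only [hb, if_neg hk, Bool.false_eq_true, if_false, List.map_cons, List.sum_cons]
      rw [← PySem.Dict.getD_eq_get?_getD]
      have := ih hnd.2
      simp only [PySem.Dict.getD_eq_get?_getD] at this ⊢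
      rw [this]; ring

-- A's guarded comprehension sum = plain sum of lookups (missing keys contribute 0)
theorem pv_totalA_eq (counts : PySem.Dict String Int) (cuis : List String) :
    ((cuis.filter (fun x => counts.contains x)).map (fun x => counts.getD x 0)).sum
      = (cuis.map (fun x => counts.getD x 0)).sum := by
  induction cuis with
  | nil => simp
  | cons x cuis ih =>
    by_cases hx : counts.contains x = true
    · simp [hx, ih]
    · have h0 : counts.getD x 0 = 0 :=
        PySem.Dict.getD_of_not_contains counts 0 (by simpa using hx)
      simp [hx, ih, h0]

-- sum-exchange: sum of lookups over cuis = sum over count items weighted by multiplicity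
theorem pv_sum_swap (counts : PySem.Dict String Int) (hnd : counts.keys.Nodup) (cuis : List String) :
    (cuis.map (fun x => counts.getD x 0)).sum
      = (counts.items.map (fun p => p.2 * (cuis.count p.1 : Int))).sum := by
  induction cuis with
  | nil => simp
  | cons x cuis ih =>
    simp only [List.map_cons, List.sum_cons, ih]
    have hcc : ∀ p : String × Int,
        p.2 * ((x :: cuis).count p.1 : Int)
          = (if p.1 = x then p.2 else 0) + p.2 * (cuis.count p.1 : Int) := by
      intro p
      rw [List.count_cons]
      by_cases hp : p.1 = x
      · simp [hp]; ring
      · have hb : (x == p.1) = false := by simp [Ne.symm hp]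
        simp [hb, hp]
    calc counts.getD x 0 + (counts.items.map (fun p => p.2 * (cuis.count p.1 : Int))).sum
        = (counts.items.map (fun p => if p.1 = x then p.2 else 0)).sum
            + (counts.items.map (fun p => p.2 * (cuis.count p.1 : Int))).sum := by
          rw [pv_getD_eq_sum counts hnd x]
      _ = (counts.items.map (fun p => (if p.1 = x then p.2 else 0) + p.2 * (cuis.count p.1 : Int))).sum := by
          rw [PySem.List.sum_map_add_int]
      _ = (counts.items.map (fun p => p.2 * ((x :: cuis).count p.1 : Int))).sum := by
          exact congrArg List.sum (List.map_congr_left (fun p _ => (hcc p).symm))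

-- the accumulate-into-one-key inner loop of B
theorem pv_modify_add (L : List String) (c : Int) (t : PySem.Dict String Int) (g : String) :
    (L.foldl (fun t g' => t.modify g' 0 (fun v => v + c)) t).getD g 0
      = t.getD g 0 + c * (L.count g : Int) := by
  induction L generalizing t with
  | nil => simp
  | cons a L ih =>
    simp only [List.foldl_cons, ih, PySem.Dict.getD_modify, List.count_cons]
    by_cases hg : g = a
    · subst hg; simp; ring
    · have hb : (a == g) = false := by simp [Ne.symm hg]
      simp [hg, hb]

-- B's totals dict, entrywise
theorem pv_totals_getD (c2g : PySem.Dict String (List String)) (l : List (String × Int))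
    (t : PySem.Dict String Int) (g : String) :
    (l.foldl (fun t p => (c2g.getD p.1 []).foldl (fun t g' => t.modify g' 0 (fun v => v + p.2)) t) t).getD g 0
      = t.getD g 0 + (l.map (fun p => p.2 * (((c2g.getD p.1 []).count g : Nat) : Int))).sum := by
  induction l generalizing t with
  | nil => simp
  | cons p l ih =>
    simp only [List.foldl_cons, ih, pv_modify_add, List.map_cons, List.sum_cons]
    ring


-- count of a constant-mapped list
theorem pv_count_map_const {α : Type} (l : List α) (a g : String) :
    ((l.map (fun _ => a)).count g) = if a = g then l.length else 0 := by
  by_cases h : a = g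
  · simp [h]
  · have hb : (g == a) = false := by simp [Ne.symm h]
    simp [List.count_replicate, h]

-- the inverted-index loop's keys are the running union of the groups' CUI lists
theorem pv_c2g_keys_gen (gi : List (String × List String)) (d : PySem.Dict String (List String)) :
    (gi.foldl (fun d nc => nc.2.foldl (fun d c => d.modify c [] (fun l => l ++ [nc.1])) d) d).keys
      = gi.foldl (fun s nc => PySem.Set.update s nc.2) d.keys := by
  induction gi generalizing d with
  | nil => rfl
  | cons nc gi ih =>
    simp only [List.foldl_cons, ih]
    congr 1
    exact PySem.Dict.keys_foldl_modify nc.2 [] (fun _ _ => (fun l => l ++ [nc.1])) d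

-- multiplicity of a group name in the inverted index entry of x
theorem pv_c2g_count (gi : List (String × List String)) (d : PySem.Dict String (List String))
    (x g : String) :
    ((gi.foldl (fun d nc => nc.2.foldl (fun d c => d.modify c [] (fun l => l ++ [nc.1])) d) d).getD x []).count g
      = ((d.getD x []).count g) + (gi.map (fun nc => if nc.1 = g then nc.2.count x else 0)).sum := by
  induction gi generalizing d with
  | nil => simp
  | cons nc gi ih =>
    simp only [List.foldl_cons, ih, List.map_cons, List.sum_cons]
    have hfold : nc.2.foldl (fun d c => d.modify c [] (fun l => l ++ [nc.1])) d
        = (nc.2.map (fun c => (c, nc.1))).foldl (fun d p => d.modify p.1 [] (fun l => l ++ [p.2])) d := by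
      rw [List.foldl_map]
    rw [hfold, PySem.Dict.getD_foldl_modify_append, List.count_append]
    have hone : (List.map (fun p => p.2) (List.filter (fun p => p.1 == x) (nc.2.map (fun c => (c, nc.1))))).count g
        = if nc.1 = g then nc.2.count x else 0 := by
      rw [List.filter_map, List.map_map]
      have he : ((fun p : String × String => p.2) ∘ (fun c => (c, nc.1))) = (fun _ => nc.1) := rfl
      have hf : ((fun p : String × String => p.1 == x) ∘ (fun c => (c, nc.1))) = (fun c => c == x) := rfl
      rw [he, hf, pv_count_map_const]
      congr 1
      rw [List.count_eq_countP, ← List.countP_eq_length_filter]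
    rw [hone]
    omega

-- with Nodup group names, the pick-sum collapses to the one matching group
theorem pv_sum_pick_group (gi : List (String × List String)) (hn : (gi.map Prod.fst).Nodup)
    (g : String) (cuis : List String) (hm : (g, cuis) ∈ gi) (x : String) :
    (gi.map (fun nc => if nc.1 = g then nc.2.count x else 0)).sum = cuis.count x := by
  induction gi with
  | nil => simp at hm
  | cons nc gi ih =>
    simp only [List.map_cons, List.nodup_cons] at hn
    rcases List.mem_cons.mp hm with h | h
    · subst h
      have hz : (gi.map (fun nc' => if nc'.1 = g then nc'.2.count x else 0)).sum = 0 := by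
        apply List.sum_eq_zero
        intro v hv
        rcases List.mem_map.mp hv with ⟨nc', hnc', he⟩
        have hne : nc'.1 ≠ g := by
          intro hcon
          apply hn.1
          show g ∈ List.map Prod.fst gi
          rw [← hcon]
          exact List.mem_map_of_mem hnc'
        simpa [hne] using he.symm
      simp [hz]
    · have h1 : nc.1 ≠ g := by
        intro hcon
        have hmem : g ∈ gi.map Prod.fst := by
          have := List.mem_map_of_mem (f := Prod.fst) h
          simpa using this
        exact hn.1 (hcon ▸ hmem)
      simp only [List.map_cons, List.sum_cons, if_neg h1, Nat.zero_add]
      exact ih hn.2 h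

-- per-group total computed by B's totals dict = A's per-group sum
theorem pv_totals_eq_totalA (groupsD : PySem.Dict String (List String))
    (hg : groupsD.keys.Nodup) (counts : PySem.Dict String Int) (hc : counts.keys.Nodup)
    (g : String) (cuis : List String) (hm : (g, cuis) ∈ groupsD.items) :
    (mcTotalsB (mcCui2Groups groupsD) counts).getD g 0
      = ((cuis.filter (fun x => counts.contains x)).map (fun x => counts.getD x 0)).sum := by
  have hn : (groupsD.items.map Prod.fst).Nodup := hg
  have hcnt : ∀ x : String, ((mcCui2Groups groupsD).getD x []).count g = cuis.count x := by
    intro x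
    unfold mcCui2Groups
    rw [pv_c2g_count]
    simp [pv_sum_pick_group groupsD.items hn g cuis hm x]
  unfold mcTotalsB
  rw [pv_totals_getD, pv_totalA_eq, pv_sum_swap counts hc cuis]
  simp only [hcnt]
  simp

-- the two per-patient group aggregations agree
theorem pv_agg_eq (groupsD : PySem.Dict String (List String)) (hg : groupsD.keys.Nodup)
    (counts : PySem.Dict String Int) (hc : counts.keys.Nodup) :
    mcAggB groupsD.keys (mcTotalsB (mcCui2Groups groupsD) counts) = mcAggA groupsD counts := by
  unfold mcAggB mcAggA
  have hk : groupsD.keys = groupsD.items.map (fun p => p.1) := rfl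
  rw [hk, List.foldl_map]
  apply PySem.List.foldl_congr_mem
  intro acc nc hnc
  have hm : (nc.1, nc.2) ∈ groupsD.items := by simpa using hnc
  rw [pv_totals_eq_totalA groupsD hg counts hc nc.1 nc.2 hm]

-- the inverted index's key list is exactly A's other_concepts set
theorem pv_c2g_keys (groupsD : PySem.Dict String (List String)) :
    (mcCui2Groups groupsD).keys = mcOther groupsD := by
  unfold mcCui2Groups mcOther
  rw [pv_c2g_keys_gen]
  have hv : groupsD.values = groupsD.items.map (fun p => p.2) := rfl
  rw [hv, List.foldl_map]
  rfl

theorem pv_contains_eq (groupsD : PySem.Dict String (List String)) (x : String) :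
    (mcCui2Groups groupsD).contains x = PySem.Set.contains (mcOther groupsD) x := by
  rw [PySem.Dict.contains_eq_decide_mem_keys, pv_c2g_keys, PySem.Set.contains_eq_listContains]
  simp

theorem pv_if_flip {α : Type} (n : Nat) (ke : Bool) (X Y : α) :
    (if n = 0 ∧ ke = false then X else Y) = (if n ≠ 0 ∨ ke then Y else X) := by
  by_cases h1 : n = 0 <;> cases ke <;> simp [h1]

-- ===== VERDICT (by name: the statement is the Claim_ definition above) =====
theorem merge_concepts_spec : Claim_equal_merge_concepts := by
  intro anns_counts groups keep_other_concepts keep_empty _dom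
  unfold Spec_merge_concepts merge_concepts merge_concepts_alt
  dsimp only
  have hg : (PySem.Dict.ofList groups : PySem.Dict String (List String)).keys.Nodup :=
    PySem.Dict.nodup_keys_ofList groups
  congr 1
  apply PySem.List.foldl_congr_mem
  intro acc pc _hpc
  have hc : (PySem.Dict.ofList pc.2 : PySem.Dict String Int).keys.Nodup :=
    PySem.Dict.nodup_keys_ofList pc.2
  have hagg : mcAggB (PySem.Dict.ofList groups).keys
      (mcTotalsB (mcCui2Groups (PySem.Dict.ofList groups)) (PySem.Dict.ofList pc.2))
      = mcAggA (PySem.Dict.ofList groups) (PySem.Dict.ofList pc.2) :=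
    pv_agg_eq (PySem.Dict.ofList groups) hg (PySem.Dict.ofList pc.2) hc
  have hoth : ∀ a : PySem.Dict String Int,
      ((PySem.Dict.ofList pc.2 : PySem.Dict String Int).items.foldl (fun a p =>
        if (mcCui2Groups (PySem.Dict.ofList groups)).contains p.1 then a.insert p.1 p.2 else a) a)
      = ((PySem.Dict.ofList pc.2 : PySem.Dict String Int).items.foldl (fun a p =>
        if PySem.Set.contains (mcOther (PySem.Dict.ofList groups)) p.1 then a.insert p.1 p.2 else a) a) := by
    intro a
    apply PySem.List.foldl_congr_mem
    intro acc' p _hp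
    rw [pv_contains_eq]
  rw [hagg, hoth, pv_if_flip]
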